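-- pv_equiv track=rewrite | github.com/desilvsj/TR-Errors-dev | drafts/archive/main-v20250528.py | get_repeat_delta
-- ===== SOURCE A (Python) =====
-- def get_repeat_delta(sequence, k):
--     seen = {}
--     for i in range(len(sequence) - k + 1):
--         kmer = sequence[i:i + k]
--         if kmer in seen:
--             return i - seen[kmer]  # Return distance between first and second occurrence
--         seen[kmer] = i
--
--     return None  # No repeat found
-- ===== SOURCE B (Python) =====
-- def get_repeat_delta(sequence, k):
--     if k < 1:
--         raise ValueError("k must be a positive k-mer length")
--     positions = {}
--     for i in range(len(sequence) - k + 1):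
--         positions.setdefault(sequence[i:i + k], []).append(i)
--     best = None
--     for ps in positions.values():
--         if len(ps) < 2:
--             continue
--         if best is None or ps[1] < best[1]:
--             best = ps
--     if best is None:
--         return None
--     return best[1] - best[0]
-- ===== Notes on version B (the rewrite author's own statement) =====
-- stated objective: alternative
-- what changed: A's single early-returning scan with a kmer->first-position dict is replaced by a full index-building pass (kmer -> list of its occurrence positions) followed by a minimum-search over the groups keyed on each group's second position; Pre_ excludes k < 1, where A scans degenerate (empty or wrapped-end) windows and returns a meaningless distance while B's validation raises ValueError.
-- outside the precondition, e.g. on get_repeat_delta('ab', 0): A returns 1, B raises ValueError; on get_repeat_delta('abcab', -1): A returns 1, B raises ValueError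
import Mathlib
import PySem

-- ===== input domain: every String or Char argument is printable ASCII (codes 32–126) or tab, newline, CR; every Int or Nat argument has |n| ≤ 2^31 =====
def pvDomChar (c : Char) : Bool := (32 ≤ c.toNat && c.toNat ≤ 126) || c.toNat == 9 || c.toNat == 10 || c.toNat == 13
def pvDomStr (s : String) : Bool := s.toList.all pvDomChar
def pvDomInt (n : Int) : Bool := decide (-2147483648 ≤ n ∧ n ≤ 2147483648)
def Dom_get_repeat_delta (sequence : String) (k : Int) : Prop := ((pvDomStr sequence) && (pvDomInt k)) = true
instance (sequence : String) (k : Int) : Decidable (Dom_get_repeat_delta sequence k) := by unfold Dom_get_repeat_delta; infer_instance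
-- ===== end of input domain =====

-- B replaces A's single early-returning scan by a full index-building pass (kmer → list of its
-- occurrence positions) followed by a minimum-search over the groups keyed on each group's second
-- position (objective: alternative decomposition, same cost).

-- ===== PORT A =====
-- A's loop 'for i in range(len(sequence)-k+1)' with its early return, as a lazy counting loop
def loopA (km : Int → List Char) (stop i : Int) (seen : PySem.Dict (List Char) Int) : Option Int :=
  if _h : i < stop then
    match seen.get? (km i) with
    | some j => some (i - j)
    | none => loopA km stop (i + 1) (seen.insert (km i) i)
  else none
termination_by (stop - i).toNat
decreasing_by omega

def get_repeat_delta (sequence : String) (k : Int) : Option Int :=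
  loopA (fun i => PySem.List.slice sequence.toList (some i) (some (i + k)))
    (PySem.Str.len sequence - k + 1) 0 PySem.Dict.empty

-- ===== PORT B =====
-- Source B's first loop: positions.setdefault(kmer, []).append(i)  ==  d[kmer] = d.get(kmer, []) + [i]
def buildLoopB (km : Int → List Char) (stop i : Int) (d : PySem.Dict (List Char) (List Int)) :
    PySem.Dict (List Char) (List Int) :=
  if _h : i < stop then buildLoopB km stop (i + 1) (d.modify (km i) [] (fun l => l ++ [i]))
  else d
termination_by (stop - i).toNat
decreasing_by omega

-- Source B's second loop: best = group with ≥ 2 positions whose second position is smallest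
def selB : List (List Int) → Option (List Int) → Option (List Int)
  | [], best => best
  | ps :: rest, none =>
      if ps.length < 2 then selB rest none
      else selB rest (some ps)
  | ps :: rest, some b =>
      if ps.length < 2 then selB rest (some b)
      else if PySem.List.pyGetD ps 1 0 < PySem.List.pyGetD b 1 0 then selB rest (some ps)
      else selB rest (some b)

def get_repeat_delta_alt (sequence : String) (k : Int) : Option Int :=
  -- for k < 1 Python B raises ValueError; that lies outside Pre_get_repeat_delta, nothing is claimed there
  if k < 1 then none else
  let d := buildLoopB (fun i => PySem.List.slice sequence.toList (some i) (some (i + k)))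
    (PySem.Str.len sequence - k + 1) 0 PySem.Dict.empty
  match selB d.values none with
  | none => none
  | some b => some (PySem.List.pyGetD b 1 0 - PySem.List.pyGetD b 0 0)

-- ===== PRECONDITION & SPEC =====
-- Pre_ excludes k < 1: there A scans degenerate (empty or wrapped-end) windows and returns a
-- meaningless distance, while B's natural validation raises ValueError.
def Pre_get_repeat_delta (sequence : String) (k : Int) : Prop := 1 ≤ k
instance (sequence : String) (k : Int) : Decidable (Pre_get_repeat_delta sequence k) := by unfold Pre_get_repeat_delta; infer_instance

def pvWitness_get_repeat_delta : String × Int := ("abcab", 2)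

def Spec_get_repeat_delta (sequence : String) (k : Int) (out : Option Int) : Prop := out = get_repeat_delta_alt sequence k
instance (sequence : String) (k : Int) (out : Option Int) : Decidable (Spec_get_repeat_delta sequence k out) := by unfold Spec_get_repeat_delta; infer_instance

-- ===== CLAIM (what is proved, stated in full; the proofs are below) =====
def Claim_equal_get_repeat_delta : Prop := ∀ (sequence : String) (k : Int), Dom_get_repeat_delta sequence k → Pre_get_repeat_delta sequence k → Spec_get_repeat_delta sequence k (get_repeat_delta sequence k)

-- ===== LEMMAS AND PROOFS =====

-- list form of A's loop, for the proofs
def goA (km : Int → List Char) : List Int → PySem.Dict (List Char) Int → Option Int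
  | [], _ => none
  | i :: rest, seen =>
      match seen.get? (km i) with
      | some j => some (i - j)
      | none => goA km rest (seen.insert (km i) i)

theorem loopA_eq (km : Int → List Char) (stop i : Int) (seen : PySem.Dict (List Char) Int) :
    loopA km stop i seen = goA km (PySem.List.pyRange i stop 1) seen := by
  by_cases h : i < stop
  · rw [loopA, dif_pos h, PySem.List.pyRange_one_cons h]
    cases hg : seen.get? (km i) with
    | some j => simp [goA, hg]
    | none => simp only [goA, hg]; exact loopA_eq km stop (i + 1) _
  · rw [loopA, dif_neg h, PySem.List.pyRange_one_eq_nil (by omega)]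
    rfl
termination_by (stop - i).toNat
decreasing_by omega

-- list form of Source B's index-building loop, for the proofs
def buildB (km : Int → List Char) (idxs : List Int) : PySem.Dict (List Char) (List Int) :=
  idxs.foldl (fun d i => d.modify (km i) [] (fun l => l ++ [i])) PySem.Dict.empty

theorem buildLoopB_eq_foldl (km : Int → List Char) (stop i : Int)
    (d : PySem.Dict (List Char) (List Int)) :
    buildLoopB km stop i d
      = (PySem.List.pyRange i stop 1).foldl (fun d i => d.modify (km i) [] (fun l => l ++ [i])) d := by
  by_cases h : i < stop
  · rw [buildLoopB, dif_pos h, PySem.List.pyRange_one_cons h, List.foldl_cons]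
    exact buildLoopB_eq_foldl km stop (i + 1) _
  · rw [buildLoopB, dif_neg h, PySem.List.pyRange_one_eq_nil (by omega)]
    rfl
termination_by (stop - i).toNat
decreasing_by omega

-- A's scan passes over a prefix of fresh kmers, recording each first position.
theorem goA_skip (km : Int → List Char) (P S : List Int) (d : PySem.Dict (List Char) Int)
    (hnd : (P.map km).Nodup) (hnone : ∀ i ∈ P, d.get? (km i) = none) :
    goA km (P ++ S) d = goA km S (P.foldl (fun d i => d.insert (km i) i) d) := by
  induction P generalizing d with
  | nil => simp
  | cons p P ih =>
    simp only [List.map_cons, List.nodup_cons] at hnd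
    simp only [List.cons_append, goA, hnone p (by simp), List.foldl_cons]
    refine ih _ hnd.2 (fun i hi => ?_)
    have hne : km i ≠ km p := fun he => hnd.1 (he ▸ List.mem_map_of_mem hi)
    rw [PySem.Dict.get?_insert_of_ne _ _ hne]
    exact hnone i (by simp [hi])

theorem get?_foldl_insert_of_not_mem (km : Int → List Char) (P : List Int)
    (d : PySem.Dict (List Char) Int) (c : List Char) (h : c ∉ P.map km) :
    (P.foldl (fun d i => d.insert (km i) i) d).get? c = d.get? c := by
  induction P generalizing d with
  | nil => rfl
  | cons p P ih =>
    simp only [List.map_cons, List.mem_cons, not_or] at h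
    rw [List.foldl_cons, ih _ (fun hc => h.2 hc), PySem.Dict.get?_insert_of_ne _ _ h.1]

theorem get?_foldl_insert_of_mem (km : Int → List Char) (P : List Int)
    (d : PySem.Dict (List Char) Int) (j0 : Int) (hj : j0 ∈ P) (hnd : (P.map km).Nodup) :
    (P.foldl (fun d i => d.insert (km i) i) d).get? (km j0) = some j0 := by
  induction P generalizing d with
  | nil => cases hj
  | cons p P ih =>
    simp only [List.map_cons, List.nodup_cons] at hnd
    rcases List.mem_cons.1 hj with rfl | hj
    · rw [List.foldl_cons,
        get?_foldl_insert_of_not_mem km P _ _ hnd.1, PySem.Dict.get?_insert_self]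
    · rw [List.foldl_cons]
      exact ih _ hj hnd.2

-- decompose a duplicated list at its FIRST duplicate
theorem exists_first_dup {α : Type} [DecidableEq α] :
    ∀ (L : List α), ¬ L.Nodup → ∃ P x S, L = P ++ x :: S ∧ P.Nodup ∧ x ∈ P := by
  intro L
  induction L with
  | nil => intro h; exact absurd List.nodup_nil h
  | cons a L ih =>
    intro h
    by_cases hL : L.Nodup
    · have ha : a ∈ L := by
        by_contra hna
        exact h (List.nodup_cons.2 ⟨hna, hL⟩)
      obtain ⟨P1, P2, rfl⟩ := List.append_of_mem ha
      rw [List.nodup_append] at hL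
      refine ⟨a :: P1, a, P2, by simp, List.nodup_cons.2 ⟨?_, hL.1⟩, by simp⟩
      exact fun haP1 => hL.2.2 a haP1 a (by simp) rfl
    · obtain ⟨P, x, S, hLeq, hP, hx⟩ := ih hL
      by_cases hap : a ∈ P
      · obtain ⟨Q1, Q2, hPeq⟩ := List.append_of_mem hap
        rw [hPeq, List.nodup_append] at hP
        refine ⟨a :: Q1, a, Q2 ++ x :: S, by simp [hLeq, hPeq], List.nodup_cons.2 ⟨?_, hP.1⟩, by simp⟩
        exact fun haQ1 => hP.2.2 a haQ1 a (by simp) rfl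
      · exact ⟨a :: P, x, S, by simp [hLeq], List.nodup_cons.2 ⟨hap, hP⟩, List.mem_cons_of_mem _ hx⟩

theorem filter_km_eq_nil (km : Int → List Char) (P : List Int) (c : List Char)
    (h : c ∉ P.map km) : P.filter (fun i => km i == c) = [] := by
  rw [List.filter_eq_nil_iff]
  intro i hi hc
  exact h (eq_of_beq hc ▸ List.mem_map_of_mem hi)

theorem filter_km_singleton (km : Int → List Char) (P : List Int) (j0 : Int)
    (hnd : (P.map km).Nodup) (hj : j0 ∈ P) :
    P.filter (fun i => km i == km j0) = [j0] := by
  induction P with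
  | nil => cases hj
  | cons p P ih =>
    simp only [List.map_cons, List.nodup_cons] at hnd
    rcases List.mem_cons.1 hj with rfl | hj
    · simp only [List.filter_cons, beq_self_eq_true, if_pos trivial]
      rw [filter_km_eq_nil km P _ hnd.1]
    · have hne : (km p == km j0) = false := by
        refine beq_eq_false_iff_ne.2 (fun he => hnd.1 (he ▸ List.mem_map_of_mem hj))
      simp only [List.filter_cons, hne]
      exact ih hnd.2 hj

theorem filter_km_len_le_one (km : Int → List Char) (R : List Int) (c : List Char)
    (hnd : (R.map km).Nodup) : (R.filter (fun i => km i == c)).length ≤ 1 := by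
  induction R with
  | nil => simp
  | cons r R ih =>
    simp only [List.map_cons, List.nodup_cons] at hnd
    by_cases hc : (km r == c) = true
    · simp only [List.filter_cons, hc, if_pos trivial]
      rw [filter_km_eq_nil km R c (fun hm => hnd.1 ((eq_of_beq hc) ▸ hm))]
      simp
    · simp only [List.filter_cons, hc]
      exact ih hnd.2

-- B's dict holds, for each distinct kmer in first-occurrence order, its list of positions
theorem valuesB (km : Int → List Char) (R : List Int) :
    (buildB km R).values
      = (PySem.Set.ofList (R.map km)).map (fun c => R.filter (fun i => km i == c)) := by
  have hkeys : (buildB km R).keys = PySem.Set.ofList (R.map km) := by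
    unfold buildB
    rw [PySem.Dict.keys_foldl_modify_key]
    rw [PySem.Dict.keys_empty, PySem.Set.update_nil_left]
  have hnd : (buildB km R).keys.Nodup := by rw [hkeys]; exact PySem.Set.nodup_ofList _
  rw [PySem.Dict.values_eq_map_keys _ hnd [], hkeys]
  refine List.map_congr_left (fun c hc => ?_)
  have hb : buildB km R
      = (R.map (fun i => (km i, i))).foldl (fun d p => d.modify p.1 [] (fun l => l ++ [p.2])) PySem.Dict.empty := by
    rw [List.foldl_map]
    rfl
  rw [hb, PySem.Dict.getD_foldl_modify_append, PySem.Dict.getD_empty, List.nil_append,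
    List.filter_map, List.map_map]
  simp [Function.comp_def]

theorem sel_none (vs : List (List Int)) (best : Option (List Int))
    (h : ∀ v ∈ vs, v.length < 2) : selB vs best = best := by
  induction vs generalizing best with
  | nil => rfl
  | cons v vs ih =>
    cases best <;> simp only [selB, if_pos (h v (by simp))] <;>
      exact ih _ (fun w hw => h w (List.mem_cons_of_mem _ hw))

theorem sel_keep (vs : List (List Int)) (g : List Int)
    (h : ∀ v ∈ vs, 2 ≤ v.length → v = g ∨ PySem.List.pyGetD g 1 0 < PySem.List.pyGetD v 1 0) :
    selB vs (some g) = some g := by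
  induction vs with
  | nil => rfl
  | cons v vs ih =>
    have htail : ∀ w ∈ vs, 2 ≤ w.length → w = g ∨ PySem.List.pyGetD g 1 0 < PySem.List.pyGetD w 1 0 :=
      fun w hw => h w (List.mem_cons_of_mem _ hw)
    by_cases hv : v.length < 2
    · simp only [selB, if_pos hv]
      exact ih htail
    · rcases h v (by simp) (by omega) with rfl | hlt
      · simp only [selB, if_neg hv, lt_irrefl, if_false]
        exact ih htail
      · simp only [selB, if_neg hv, if_neg (not_lt.2 (le_of_lt hlt))]
        exact ih htail

theorem sel_find (vs : List (List Int)) (g : List Int) (b? : Option (List Int))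
    (hg : g ∈ vs) (hlen : 2 ≤ g.length)
    (h : ∀ v ∈ vs, 2 ≤ v.length → v = g ∨ PySem.List.pyGetD g 1 0 < PySem.List.pyGetD v 1 0)
    (hb : b? = none ∨ ∃ b, b? = some b ∧ PySem.List.pyGetD g 1 0 < PySem.List.pyGetD b 1 0) :
    selB vs b? = some g := by
  induction vs generalizing b? with
  | nil => cases hg
  | cons v vs ih =>
    have htail : ∀ w ∈ vs, 2 ≤ w.length → w = g ∨ PySem.List.pyGetD g 1 0 < PySem.List.pyGetD w 1 0 :=
      fun w hw => h w (List.mem_cons_of_mem _ hw)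
    by_cases hveq : v = g
    · subst hveq
      rcases hb with rfl | ⟨b, rfl, hsec⟩
      · simp only [selB, if_neg (by omega : ¬ v.length < 2)]
        exact sel_keep vs v htail
      · simp only [selB, if_neg (by omega : ¬ v.length < 2), if_pos hsec]
        exact sel_keep vs v htail
    · have hgvs : g ∈ vs := (List.mem_cons.1 hg).resolve_left (fun e => hveq e.symm)
      by_cases hv : v.length < 2
      · rcases hb with rfl | ⟨b, rfl, hsec⟩ <;> simp only [selB, if_pos hv]
        · exact ih _ hgvs htail (Or.inl rfl)
        · exact ih _ hgvs htail (Or.inr ⟨b, rfl, hsec⟩)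
      · have hlt : PySem.List.pyGetD g 1 0 < PySem.List.pyGetD v 1 0 :=
          (h v (by simp) (by omega)).resolve_left hveq
        rcases hb with rfl | ⟨b, rfl, hsec⟩
        · simp only [selB, if_neg hv]
          exact ih _ hgvs htail (Or.inr ⟨v, rfl, hlt⟩)
        · simp only [selB, if_neg hv]
          by_cases hc : PySem.List.pyGetD v 1 0 < PySem.List.pyGetD b 1 0
          · rw [if_pos hc]
            exact ih _ hgvs htail (Or.inr ⟨v, rfl, hlt⟩)
          · rw [if_neg hc]
            exact ih _ hgvs htail (Or.inr ⟨b, rfl, hsec⟩)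

-- the second element of a ≤1-prefix ++ S-part list lies in the S-part
theorem second_lt (j : Int) (v P1 S1 : List Int) (hv : v = P1 ++ S1)
    (hP1 : P1.length ≤ 1) (h2 : 2 ≤ v.length) (hS : ∀ s ∈ S1, j < s) :
    j < PySem.List.pyGetD v 1 0 := by
  subst hv
  cases P1 with
  | nil =>
    cases S1 with
    | nil => simp at h2
    | cons a t =>
      cases t with
      | nil => simp at h2
      | cons b t2 =>
        have hb : PySem.List.pyGetD ([] ++ a :: b :: t2 : List Int) 1 0 = b := by simp [pysem]
        rw [hb]
        exact hS b (by simp)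
  | cons p t1 =>
    have ht1 : t1 = [] := by
      cases t1
      · rfl
      · simp at hP1
    subst ht1
    cases S1 with
    | nil => simp at h2
    | cons b t2 =>
      have hb : PySem.List.pyGetD ([p] ++ b :: t2 : List Int) 1 0 = b := by simp [pysem]
      rw [hb]
      exact hS b (by simp)

theorem A_none (km : Int → List Char) (R : List Int) (hnd : (R.map km).Nodup) :
    goA km R PySem.Dict.empty = none := by
  have h := goA_skip km R [] PySem.Dict.empty hnd (fun i _ => by simp [pysem])
  simpa using h

theorem B_none (km : Int → List Char) (R : List Int) (hnd : (R.map km).Nodup) :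
    selB (buildB km R).values none = none := by
  rw [valuesB km R, sel_none]
  intro v hv
  obtain ⟨c, hc, rfl⟩ := List.mem_map.1 hv
  have hle := filter_km_len_le_one km R c hnd
  omega

theorem A_dup_found (km : Int → List Char) (P S : List Int) (j j0 : Int)
    (hPl : (P.map km).Nodup) (hj0P : j0 ∈ P) (hkmj0 : km j0 = km j) :
    goA km (P ++ j :: S) PySem.Dict.empty = some (j - j0) := by
  rw [goA_skip km P (j :: S) _ hPl (fun i _ => by simp [pysem])]
  simp only [goA]
  rw [← hkmj0, get?_foldl_insert_of_mem km P _ j0 hj0P hPl]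

theorem B_dup_found (km : Int → List Char) (P S : List Int) (j j0 : Int)
    (hpw : (P ++ j :: S).Pairwise (· < ·))
    (hPl : (P.map km).Nodup) (hj0P : j0 ∈ P) (hkmj0 : km j0 = km j) :
    (match selB (buildB km (P ++ j :: S)).values none with
     | none => none
     | some b => some (PySem.List.pyGetD b 1 0 - PySem.List.pyGetD b 0 0)) = some (j - j0) := by
  have hjS : ∀ s ∈ S, j < s := by
    rw [List.pairwise_append] at hpw
    exact fun s hs => (List.pairwise_cons.1 hpw.2.1).1 s hs
  have h1 : P.filter (fun i => km i == km j) = [j0] := by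
    rw [← hkmj0]
    exact filter_km_singleton km P j0 hPl hj0P
  have hgfilt : (P ++ j :: S).filter (fun i => km i == km j)
      = j0 :: j :: S.filter (fun i => km i == km j) := by
    simp [List.filter_append, h1]
  rw [valuesB km (P ++ j :: S)]
  have hsel : selB ((PySem.Set.ofList ((P ++ j :: S).map km)).map
        (fun c => (P ++ j :: S).filter (fun i => km i == c))) none
      = some (j0 :: j :: S.filter (fun i => km i == km j)) := by
    refine sel_find _ _ _ (List.mem_map.2 ⟨km j, (PySem.Set.mem_ofList _ _).2 (by simp), hgfilt⟩)
      (by simp) ?_ (Or.inl rfl)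
    intro v hv h2
    obtain ⟨c', hc', rfl⟩ := List.mem_map.1 hv
    by_cases hcc : c' = km j
    · subst hcc
      exact Or.inl hgfilt
    · refine Or.inr ?_
      have hsec : PySem.List.pyGetD (j0 :: j :: S.filter (fun i => km i == km j)) 1 0 = j := by
        simp [pysem]
      rw [hsec]
      have hjv : (km j == c') = false := beq_eq_false_iff_ne.2 (fun e => hcc e.symm)
      have hveq2 : (P ++ j :: S).filter (fun i => km i == c')
          = P.filter (fun i => km i == c') ++ S.filter (fun i => km i == c') := by
        simp [List.filter_append, hjv]
      exact second_lt j _ _ _ hveq2 (filter_km_len_le_one km P c' hPl) h2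
        (fun s hs => hjS s (List.mem_filter.1 hs).1)
  rw [hsel]
  simp [pysem]

-- the generic equivalence, for any kmer function and strictly increasing index list
theorem AeqB (km : Int → List Char) (R : List Int) (hpw : R.Pairwise (· < ·)) :
    goA km R PySem.Dict.empty
      = (match selB (buildB km R).values none with
         | none => none
         | some b => some (PySem.List.pyGetD b 1 0 - PySem.List.pyGetD b 0 0)) := by
  by_cases hnd : (R.map km).Nodup
  · rw [A_none km R hnd, B_none km R hnd]
  · obtain ⟨Pl, c, Sl, hLeq, hPl, hcPl⟩ := exists_first_dup (R.map km) hnd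
    obtain ⟨P, R2, rfl, hPm, hR2⟩ := List.map_eq_append_iff.1 hLeq
    obtain ⟨j, S, rfl, hjc, hSm⟩ := List.map_eq_cons_iff.1 hR2
    subst hPm hjc
    obtain ⟨j0, hj0P, hkmj0⟩ := List.mem_map.1 hcPl
    rw [A_dup_found km P S j j0 hPl hj0P hkmj0, B_dup_found km P S j j0 hpw hPl hj0P hkmj0]

-- ===== VERDICT (by name: the statement is the Claim_ definition above) =====
theorem get_repeat_delta_spec : Claim_equal_get_repeat_delta := by
  intro sequence k _ hk
  unfold Spec_get_repeat_delta get_repeat_delta get_repeat_delta_alt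
  rw [if_neg (by exact not_lt.2 hk), loopA_eq, buildLoopB_eq_foldl]
  exact AeqB _ _ (PySem.List.pairwise_lt_pyRange_one 0 _)
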